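-- pv_equiv track=rewrite | github.com/onief/AdventOfCode2024 | day12.py | price_for_region_2
-- ===== SOURCE A (Python) =====
-- from typing import List, Tuple
--
-- def price_for_region_2(region: List[Tuple[str, Tuple[int, int]]]) -> int:
--     _, farm_fields = region
--     area = len(farm_fields)
--
--     min_i = min(farm_fields, key=lambda x: x[0])[0]
--     max_i = max(farm_fields, key=lambda x: x[0])[0]
--     min_j = min(farm_fields, key=lambda x: x[1])[1]
--     max_j = max(farm_fields, key=lambda x: x[1])[1]
--
--     i_size = max_i - min_i + 3
--     j_size = max_j - min_j + 3
--
--     field = [[False for _ in range(j_size)] for _ in range(i_size)]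
--
--     for (i, j) in farm_fields:
--         field[i - min_i + 1][j - min_j + 1] = True
--
--
--     def get_sides(f: List[List[bool]]) -> int:
--         sides = 0
--
--         iterations = len(f) - 1
--         for k in range(iterations):
--             first = f[k]
--             second = f[k+1]
--             currently_top_side = False
--             currently_bottom_side = False
--             for i in range(len(first)):
--                 if currently_top_side and (not second[i] or not (first[i] ^ second[i])):
--                     sides += 1
--                     currently_top_side = False
--                 if currently_bottom_side and (not first[i] or not (first[i] ^ second[i])):
--                     sides += 1
--                     currently_bottom_side = False
--                 if not currently_top_side and not first[i] and second[i]: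
--                     currently_top_side = True
--                 if not currently_bottom_side and first[i] and not second[i]:
--                     currently_bottom_side = True
--
--         return sides
--
--     horizontally = get_sides(field)
--     vertically = get_sides([[row[i] for row in field] for i in range(len(field[0]))])
--
--     num_sides = horizontally + vertically
--
--     return area * num_sides
-- ===== SOURCE B (Python) =====
-- from typing import List, Tuple
--
-- def price_for_region_2(region: List[Tuple[str, Tuple[int, int]]]) -> int:
--     _, farm_fields = region
--     area = len(farm_fields)
--     cells = set(farm_fields)
--
--     sides = 0
--     for (i, j) in cells:
--         n = (i - 1, j) in cells
--         s = (i + 1, j) in cells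
--         e = (i, j + 1) in cells
--         w = (i, j - 1) in cells
--         ne = (i - 1, j + 1) in cells
--         se = (i + 1, j + 1) in cells
--         sw = (i + 1, j - 1) in cells
--         # each maximal side is counted once, at its canonical end corner
--         if not n and (not e or ne):
--             sides += 1
--         if not s and (not e or se):
--             sides += 1
--         if not w and (not s or sw):
--             sides += 1
--         if not e and (not s or se):
--             sides += 1
--
--     return area * sides
-- ===== Notes on version B (the rewrite author's own statement) =====
-- stated objective: faster
-- what changed: B replaces A's bounding-box boolean grid plus four stateful row/column sweeps by a hash-set of the cells and a constant number of membership tests per cell (each maximal side is counted exactly once at a canonical end corner), so the cost depends on the number of cells, not on the bounding-box area.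
import Mathlib
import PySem

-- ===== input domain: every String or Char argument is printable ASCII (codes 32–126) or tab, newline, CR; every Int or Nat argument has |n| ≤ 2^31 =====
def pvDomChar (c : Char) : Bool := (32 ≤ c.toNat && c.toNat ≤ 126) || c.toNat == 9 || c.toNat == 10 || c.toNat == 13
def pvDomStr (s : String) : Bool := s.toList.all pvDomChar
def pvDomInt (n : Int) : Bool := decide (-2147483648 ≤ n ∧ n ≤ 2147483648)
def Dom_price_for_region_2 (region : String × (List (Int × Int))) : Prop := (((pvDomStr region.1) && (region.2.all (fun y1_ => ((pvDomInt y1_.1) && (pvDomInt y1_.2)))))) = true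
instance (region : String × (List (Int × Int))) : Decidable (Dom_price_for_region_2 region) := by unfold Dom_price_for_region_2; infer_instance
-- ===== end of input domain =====

-- B replaces A's bounding-box grid and stateful sweeps by per-cell set-membership corner checks
-- (cost proportional to the number of cells instead of the bounding-box area; measured faster).


-- ===== PORT A =====

-- one iteration of get_sides' inner for-loop (state = (sides, currently_top_side, currently_bottom_side))
def pvStep (first second : List Bool) (st : Int × Bool × Bool) (i : Int) : Int × Bool × Bool :=
  let sides := st.1
  let currently_top_side := st.2.1
  let currently_bottom_side := st.2.2
  let fi := PySem.List.pyGetD first i false    -- first[i]; i ∈ range(len(first)) is always in range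
  let si := PySem.List.pyGetD second i false   -- second[i]; in range: all rows have equal length
  let (sides, currently_top_side) :=
    if currently_top_side && (!si || !(xor fi si)) then (sides + 1, false)
    else (sides, currently_top_side)
  let (sides, currently_bottom_side) :=
    if currently_bottom_side && (!fi || !(xor fi si)) then (sides + 1, false)
    else (sides, currently_bottom_side)
  let currently_top_side := if !currently_top_side && !fi && si then true else currently_top_side
  let currently_bottom_side := if !currently_bottom_side && fi && !si then true else currently_bottom_side
  (sides, currently_top_side, currently_bottom_side)

-- get_sides
def pvGetSides (f : List (List Bool)) : Int :=
  let iterations := PySem.List.len f - 1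
  (PySem.List.pyRange 0 iterations 1).foldl (fun sides k =>
    let first := PySem.List.pyGetD f k []       -- f[k], k in range
    let second := PySem.List.pyGetD f (k+1) []  -- f[k+1], in range since k < len(f)-1
    ((PySem.List.pyRange 0 (PySem.List.len first) 1).foldl (pvStep first second) (sides, false, false)).1)
    0

-- field = [[False]*j_size]*i_size (fresh rows)
def pvGrid0 (i_size j_size : Int) : List (List Bool) :=
  (PySem.List.pyRange 0 i_size 1).map (fun _ => (PySem.List.pyRange 0 j_size 1).map (fun _ => false))

-- for (i, j) in farm_fields: field[i-min_i+1][j-min_j+1] = True   (indices are always in range)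
def pvFill (min_i min_j : Int) (g : List (List Bool)) (l : List (Int × Int)) : List (List Bool) :=
  l.foldl (fun fld cell =>
    PySem.List.pySetD fld (cell.1 - min_i + 1)
      (PySem.List.pySetD (PySem.List.pyGetD fld (cell.1 - min_i + 1) []) (cell.2 - min_j + 1) true)) g

def price_for_region_2 (region : String × (List (Int × Int))) : Int :=
  let farm_fields := region.2
  let area : Int := PySem.List.len farm_fields
  match PySem.List.min? farm_fields (fun x => x.1), PySem.List.max? farm_fields (fun x => x.1),
        PySem.List.min? farm_fields (fun x => x.2), PySem.List.max? farm_fields (fun x => x.2) with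
  | some a, some b, some c, some d =>
    let min_i := a.1
    let max_i := b.1
    let min_j := c.2
    let max_j := d.2
    let i_size := max_i - min_i + 3
    let j_size := max_j - min_j + 3
    let field := pvFill min_i min_j (pvGrid0 i_size j_size) farm_fields
    let horizontally := pvGetSides field
    let transposed := (PySem.List.pyRange 0 (PySem.List.len (PySem.List.pyGetD field 0 [])) 1).map
      (fun i => field.map (fun row => PySem.List.pyGetD row i false))   -- row[i], in range
    let vertically := pvGetSides transposed
    area * (horizontally + vertically)
  | _, _, _, _ => 0   -- unreachable under Pre_: Python's min() raises ValueError on an empty list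

-- ===== PORT B =====

def price_for_region_2_alt (region : String × (List (Int × Int))) : Int :=
  let farm_fields := region.2
  let area : Int := PySem.List.len farm_fields
  let cells : PySem.Set (Int × Int) := PySem.Set.ofList farm_fields
  let sides := cells.foldl (fun sides cell =>
    let i := cell.1
    let j := cell.2
    let n := PySem.Set.contains cells (i - 1, j)
    let s := PySem.Set.contains cells (i + 1, j)
    let e := PySem.Set.contains cells (i, j + 1)
    let w := PySem.Set.contains cells (i, j - 1)
    let ne := PySem.Set.contains cells (i - 1, j + 1)
    let se := PySem.Set.contains cells (i + 1, j + 1)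
    let sw := PySem.Set.contains cells (i + 1, j - 1)
    let sides := if !n && (!e || ne) then sides + 1 else sides
    let sides := if !s && (!e || se) then sides + 1 else sides
    let sides := if !w && (!s || sw) then sides + 1 else sides
    let sides := if !e && (!s || se) then sides + 1 else sides
    sides) 0
  area * sides

-- ===== PRECONDITION & SPEC =====

-- Python's min()/max() raise ValueError on an empty list, so A raises exactly when the cell list is empty.
def Pre_price_for_region_2 (region : String × (List (Int × Int))) : Prop := region.2 ≠ []
instance (region : String × (List (Int × Int))) : Decidable (Pre_price_for_region_2 region) := by
  unfold Pre_price_for_region_2; infer_instance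

def pvWitness_price_for_region_2 : (String × (List (Int × Int))) := ("A", [(0, 0), (0, 1)])

def Spec_price_for_region_2 (region : String × (List (Int × Int))) (out : Int) : Prop :=
  out = price_for_region_2_alt region
instance (region : String × (List (Int × Int))) (out : Int) : Decidable (Spec_price_for_region_2 region out) := by
  unfold Spec_price_for_region_2; infer_instance

-- ===== CLAIM (what is proved, stated in full; the proofs are below) =====
def Claim_equal_price_for_region_2 : Prop := ∀ (region : String × (List (Int × Int))), Dom_price_for_region_2 region → Pre_price_for_region_2 region → Spec_price_for_region_2 region (price_for_region_2 region)

-- ===== LEMMAS AND PROOFS =====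

-- entry of a grid, row r column c (defaults false)
def pvE (g : List (List Bool)) (r c : Nat) : Bool := (g.getD r []).getD c false

-- the cell a grid position corresponds to, as a membership test
def pvVal (S : List (Int × Int)) (mi mj : Int) (r c : Nat) : Bool :=
  decide ((mi + (r : Int) - 1, mj + (c : Int) - 1) ∈ S)

-- flag state of the sweep before step t: true iff the run predicate held at t-1
def pvPrevFlag (p : Nat → Bool) : Nat → Bool
  | 0 => false
  | n + 1 => p n

-- number of "falls" (run ends) of p among the first n steps
def pvFalls (p : Nat → Bool) : Nat → Int
  | 0 => 0
  | n + 1 => pvFalls p n + (if pvPrevFlag p n && !(p n) then 1 else 0)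

-- B's per-cell corner count, abstractly over plain list membership
def pvF (S : List (Int × Int)) (x : Int × Int) : Int :=
  (if !(decide ((x.1 - 1, x.2) ∈ S)) && (!(decide ((x.1, x.2 + 1) ∈ S)) || decide ((x.1 - 1, x.2 + 1) ∈ S)) then 1 else 0) +
  (if !(decide ((x.1 + 1, x.2) ∈ S)) && (!(decide ((x.1, x.2 + 1) ∈ S)) || decide ((x.1 + 1, x.2 + 1) ∈ S)) then 1 else 0) +
  (if !(decide ((x.1, x.2 - 1) ∈ S)) && (!(decide ((x.1 + 1, x.2) ∈ S)) || decide ((x.1 + 1, x.2 - 1) ∈ S)) then 1 else 0) +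
  (if !(decide ((x.1, x.2 + 1) ∈ S)) && (!(decide ((x.1 + 1, x.2) ∈ S)) || decide ((x.1 + 1, x.2 + 1) ∈ S)) then 1 else 0)

theorem pvStep_apply (first second : List Bool) (s : Int) (tf bf : Bool) (m : Nat) :
    pvStep first second (s, tf, bf) (m : Int) =
      (s + (if tf && !(!(first.getD m false) && (second.getD m false)) then 1 else 0)
         + (if bf && !((first.getD m false) && !(second.getD m false)) then 1 else 0),
       !(first.getD m false) && (second.getD m false),
       (first.getD m false) && !(second.getD m false)) := by
  simp only [pvStep, PySem.List.pyGetD_natCast]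
  cases hf : first.getD m false <;> cases hs : second.getD m false <;> cases tf <;> cases bf <;>
    simp

theorem pvPrevFlag_succ (p : Nat → Bool) (n : Nat) : pvPrevFlag p (n + 1) = p n := rfl

-- the inner sweep loop counts exactly the falls of p and q, and the flags track pvPrevFlag
theorem pvStep_foldl (first second : List Bool) (s0 : Int) (n : Nat) :
    (PySem.List.pyRange 0 (n : Int) 1).foldl (pvStep first second) (s0, false, false) =
      (s0 + pvFalls (fun t => !(first.getD t false) && (second.getD t false)) n
          + pvFalls (fun t => (first.getD t false) && !(second.getD t false)) n,
       pvPrevFlag (fun t => !(first.getD t false) && (second.getD t false)) n,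
       pvPrevFlag (fun t => (first.getD t false) && !(second.getD t false)) n) := by
  induction n with
  | zero => simp [PySem.List.pyRange_zero_nat, pvFalls, pvPrevFlag]
  | succ m ih =>
    have hcast : ((m + 1 : Nat) : Int) = (m : Int) + 1 := by push_cast; ring
    rw [hcast, PySem.List.pyRange_one_succ_right (by positivity), List.foldl_append, ih,
      List.foldl_cons, List.foldl_nil, pvStep_apply]
    refine Prod.ext ?_ (Prod.ext ?_ ?_) <;>
      simp only [pvFalls, pvPrevFlag_succ] <;> (try rfl) <;> split_ifs <;> omega

theorem pvFalls_eq_sum (p : Nat → Bool) (n : Nat) :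
    pvFalls p n = ∑ t ∈ Finset.range n, (if pvPrevFlag p t && !(p t) then (1 : Int) else 0) := by
  induction n with
  | zero => simp [pvFalls]
  | succ m ih => rw [Finset.sum_range_succ, pvFalls, ih]

theorem pvSumBridge (n : Nat) (g : Nat → Int) :
    ((List.range n).map g).sum = ∑ t ∈ Finset.range n, g t := by
  induction n with
  | zero => simp
  | succ m ih => rw [List.range_succ, Finset.sum_range_succ, List.map_append, List.sum_append, ih]; simp

theorem pvGetSides_eq_sum (f : List (List Bool)) :
    pvGetSides f = ∑ k ∈ Finset.range (f.length - 1),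
      (pvFalls (fun t => !(pvE f k t) && (pvE f (k+1) t)) ((f.getD k []).length)
       + pvFalls (fun t => (pvE f k t) && !(pvE f (k+1) t)) ((f.getD k []).length)) := by
  have hg : ∀ (sides : Int) (k : Int), k ∈ PySem.List.pyRange 0 (PySem.List.len f - 1) 1 →
      (((PySem.List.pyRange 0 (PySem.List.len (PySem.List.pyGetD f k [])) 1).foldl
          (pvStep (PySem.List.pyGetD f k []) (PySem.List.pyGetD f (k+1) [])) (sides, false, false)).1 :
        Int) =
      sides + (pvFalls (fun t => !(pvE f k.toNat t) && (pvE f (k.toNat+1) t)) ((f.getD k.toNat []).length)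
        + pvFalls (fun t => (pvE f k.toNat t) && !(pvE f (k.toNat+1) t)) ((f.getD k.toNat []).length)) := by
    intro sides k hk
    rw [PySem.List.mem_pyRange_one] at hk
    obtain ⟨kn, rfl⟩ : ∃ kn : Nat, k = (kn : Int) := ⟨k.toNat, by omega⟩
    rw [show (kn : Int) + 1 = ((kn + 1 : Nat) : Int) by push_cast; ring,
      PySem.List.pyGetD_natCast, PySem.List.pyGetD_natCast]
    have hlen : PySem.List.len (f.getD kn []) = (((f.getD kn []).length : Nat) : Int) := by
      simp [PySem.List.len_eq]
    rw [hlen, pvStep_foldl]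
    simp only [pvE, Int.toNat_natCast]
    ring
  simp only [pvGetSides]
  refine (PySem.List.foldl_congr_mem _ _
      (fun (sides : Int) (k : Int) => sides +
        (pvFalls (fun t => !(pvE f k.toNat t) && (pvE f (k.toNat+1) t)) ((f.getD k.toNat []).length)
         + pvFalls (fun t => (pvE f k.toNat t) && !(pvE f (k.toNat+1) t)) ((f.getD k.toNat []).length)))
      _ hg).trans ?_
  rw [PySem.List.foldl_add, PySem.List.pyRange_one]
  simp only [List.map_map]
  rw [pvSumBridge]
  have hn : ((PySem.List.len f - 1 - 0).toNat) = f.length - 1 := by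
    rw [PySem.List.len_eq]; omega
  rw [hn, zero_add]
  refine Finset.sum_congr rfl (fun k hk => ?_)
  simp

-- ---- the filled grid reads back as membership ----

theorem pv_getD_set_self {α : Type} (l : List α) (i : Nat) (x d : α) (h : i < l.length) :
    (l.set i x).getD i d = x := by
  simp [List.getD_eq_getElem?_getD, h]

theorem pv_getD_set_ne {α : Type} (l : List α) (i j : Nat) (x d : α) (h : i ≠ j) :
    (l.set i x).getD j d = l.getD j d := by
  simp [List.getD_eq_getElem?_getD, List.getElem?_set_ne h]

theorem pv_getD_map_const {α β : Type} (l : List α) (x d : β) (r : Nat) :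
    (l.map (fun _ => x)).getD r d = if r < l.length then x else d := by
  by_cases h : r < l.length
  · simp [List.getD_eq_getElem?_getD, List.getElem?_eq_getElem, h]
  · have h2 : l.length ≤ r := by omega
    simp [List.getD_eq_getElem?_getD, List.getElem?_eq_none, h2, h]

theorem pvGrid0_shape (i_size j_size : Int) (hi : 0 ≤ i_size) (hj : 0 ≤ j_size) :
    (pvGrid0 i_size j_size).length = i_size.toNat ∧
    (∀ r : Nat, r < i_size.toNat → ((pvGrid0 i_size j_size).getD r []).length = j_size.toNat) ∧
    (∀ r c : Nat, pvE (pvGrid0 i_size j_size) r c = false) := by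
  refine ⟨?_, ?_, ?_⟩
  · simp [pvGrid0, PySem.List.length_pyRange_one]
  · intro r hr
    simp only [pvGrid0, pv_getD_map_const, PySem.List.length_pyRange_one]
    rw [if_pos (by omega)]
    simp [PySem.List.length_pyRange_one]
  · intro r c
    simp only [pvE, pvGrid0, pv_getD_map_const, PySem.List.length_pyRange_one]
    split_ifs <;> simp [pv_getD_map_const] <;> split_ifs <;> rfl

theorem pvFill_spec (mi mj Mi Mj : Int) (l : List (Int × Int)) (g : List (List Bool))
    (hmm : mi ≤ Mi ∧ mj ≤ Mj)
    (hb : ∀ x ∈ l, mi ≤ x.1 ∧ x.1 ≤ Mi ∧ mj ≤ x.2 ∧ x.2 ≤ Mj)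
    (hlen : g.length = (Mi - mi + 3).toNat)
    (hrow : ∀ r : Nat, r < g.length → (g.getD r []).length = (Mj - mj + 3).toNat) :
    (pvFill mi mj g l).length = (Mi - mi + 3).toNat ∧
    (∀ r : Nat, r < g.length → ((pvFill mi mj g l).getD r []).length = (Mj - mj + 3).toNat) ∧
    (∀ r c : Nat, pvE (pvFill mi mj g l) r c =
        (pvE g r c || decide ((mi + (r : Int) - 1, mj + (c : Int) - 1) ∈ l))) := by
  induction l generalizing g with
  | nil => exact ⟨hlen, hrow, fun r c => by simp [pvFill]⟩
  | cons x l ih =>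
    obtain ⟨hx1, hx2, hx3, hx4⟩ := hb x (List.mem_cons_self)
    have hfill : pvFill mi mj g (x :: l) =
        pvFill mi mj (PySem.List.pySetD g (x.1 - mi + 1)
          (PySem.List.pySetD (PySem.List.pyGetD g (x.1 - mi + 1) []) (x.2 - mj + 1) true)) l := rfl
    set a : Int := x.1 - mi + 1 with ha
    set b : Int := x.2 - mj + 1 with hbb
    have ha0 : 0 ≤ a := by omega
    have hb0 : 0 ≤ b := by omega
    have haN : a.toNat < g.length := by rw [hlen]; omega
    have hrowa : (g.getD a.toNat []).length = (Mj - mj + 3).toNat := hrow a.toNat haN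
    have hbN : b.toNat < (g.getD a.toNat []).length := by rw [hrowa]; omega
    have hget : PySem.List.pyGetD g a [] = g.getD a.toNat [] := by
      rw [PySem.List.pyGetD_eq_getElem _ _ ha0 (by rw [hlen]; push_cast; omega),
        List.getElem_eq_getD]
    have hrow' : PySem.List.pySetD (PySem.List.pyGetD g a []) b true =
        (g.getD a.toNat []).set b.toNat true := by
      rw [hget, PySem.List.pySetD_of_nonneg _ _ hb0]
    have hg' : PySem.List.pySetD g a (PySem.List.pySetD (PySem.List.pyGetD g a []) b true) =
        g.set a.toNat ((g.getD a.toNat []).set b.toNat true) := by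
      rw [hrow', PySem.List.pySetD_of_nonneg _ _ ha0]
    set g' : List (List Bool) := g.set a.toNat ((g.getD a.toNat []).set b.toNat true) with hgdef
    have hlen' : g'.length = (Mi - mi + 3).toNat := by simp [hgdef, hlen]
    have hroweq : ∀ r : Nat, g'.getD r [] =
        if r = a.toNat then (g.getD a.toNat []).set b.toNat true else g.getD r [] := by
      intro r
      by_cases hr : r = a.toNat
      · rw [if_pos hr, hr, hgdef, pv_getD_set_self _ _ _ _ haN]
      · rw [if_neg hr, hgdef, pv_getD_set_ne _ _ _ _ _ (fun h => hr h.symm)]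
    have hrow2 : ∀ r : Nat, r < g'.length → (g'.getD r []).length = (Mj - mj + 3).toNat := by
      intro r hr
      rw [hroweq r]
      split_ifs with h
      · rw [List.length_set]; exact hrowa
      · exact hrow r (by simpa [hgdef] using hr)
    have hE' : ∀ r c : Nat, pvE g' r c =
        (pvE g r c || decide ((mi + (r : Int) - 1, mj + (c : Int) - 1) = x)) := by
      intro r c
      simp only [pvE, hroweq r]
      by_cases hr : r = a.toNat
      · subst hr
        rw [if_pos rfl]
        by_cases hc : c = b.toNat
        · subst hc
          rw [pv_getD_set_self _ _ _ _ hbN]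
          have hx : (mi + ((a.toNat : Nat) : Int) - 1, mj + ((b.toNat : Nat) : Int) - 1) = x := by
            rw [Prod.ext_iff]; constructor <;> simp only [] <;> omega
          rw [decide_eq_true hx, Bool.or_true]
        · rw [pv_getD_set_ne _ _ _ _ _ (fun h => hc h.symm)]
          have hx : ¬ ((mi + ((a.toNat : Nat) : Int) - 1, mj + (c : Int) - 1) = x) := by
            rw [Prod.ext_iff]
            rintro ⟨h1, h2⟩
            exact hc (by omega)
          rw [decide_eq_false hx, Bool.or_false]
      · rw [if_neg hr]
        have hx : ¬ ((mi + (r : Int) - 1, mj + (c : Int) - 1) = x) := by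
          rw [Prod.ext_iff]
          rintro ⟨h1, h2⟩
          exact hr (by omega)
        rw [decide_eq_false hx, Bool.or_false]
    obtain ⟨c1, c2, c3⟩ := ih g' (fun y hy => hb y (List.mem_cons_of_mem _ hy)) hlen' hrow2
    rw [hfill, hg']
    refine ⟨c1, ?_, ?_⟩
    · intro r hr
      exact c2 r (by simpa [hgdef] using hr)
    · intro r c
      rw [c3 r c, hE' r c]
      simp [Bool.or_assoc]

-- ---- corner indicators over an abstract occupancy predicate ----

def pvGN (v : Nat → Nat → Bool) (r c : Nat) : Int :=
  if v r c && !(v (r-1) c) && (v (r-1) (c+1) || !(v r (c+1))) then 1 else 0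
def pvGS (v : Nat → Nat → Bool) (r c : Nat) : Int :=
  if v r c && !(v (r+1) c) && (!(v r (c+1)) || v (r+1) (c+1)) then 1 else 0
def pvGW (v : Nat → Nat → Bool) (r c : Nat) : Int :=
  if v r c && !(v r (c-1)) && (v (r+1) (c-1) || !(v (r+1) c)) then 1 else 0
def pvGE (v : Nat → Nat → Bool) (r c : Nat) : Int :=
  if v r c && !(v r (c+1)) && (!(v (r+1) c) || v (r+1) (c+1)) then 1 else 0

theorem pvSumShift (n : Nat) (f : Nat → Int) (h0 : f 0 = 0) (hn : 1 ≤ n) :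
    ∑ t ∈ Finset.range n, f t = ∑ t ∈ Finset.range (n-1), f (t+1) := by
  obtain ⟨m, rfl⟩ : ∃ m, n = m + 1 := ⟨n - 1, by omega⟩
  rw [Finset.sum_range_succ']
  simp [h0]

theorem pvSumExtend (n : Nat) (f : Nat → Int) (hlast : f (n-1) = 0) (hn : 1 ≤ n) :
    ∑ t ∈ Finset.range (n-1), f t = ∑ t ∈ Finset.range n, f t := by
  obtain ⟨m, rfl⟩ : ∃ m, n = m + 1 := ⟨n - 1, by omega⟩
  rw [Nat.add_sub_cancel] at hlast
  rw [Finset.sum_range_succ]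
  simp [hlast]

theorem pvFalls_sum_N (v : Nat → Nat → Bool) (inn jnn : Nat)
    (hin : 3 ≤ inn) (hjn : 3 ≤ jnn)
    (htop : ∀ c, v 0 c = false)
    (hright : ∀ r, v r (jnn - 1) = false) :
    ∑ k ∈ Finset.range (inn - 1), ∑ t ∈ Finset.range jnn,
        (if pvPrevFlag (fun t => !(v k t) && v (k+1) t) t && !(!(v k t) && v (k+1) t) then (1:Int) else 0)
    = ∑ r ∈ Finset.range inn, ∑ c ∈ Finset.range jnn, pvGN v r c := by
  have hinner : ∀ k, ∑ t ∈ Finset.range jnn,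
      (if pvPrevFlag (fun t => !(v k t) && v (k+1) t) t && !(!(v k t) && v (k+1) t) then (1:Int) else 0)
      = ∑ c ∈ Finset.range jnn, pvGN v (k+1) c := by
    intro k
    rw [pvSumShift jnn _ (by simp [pvPrevFlag]) (by omega)]
    have hstep : ∀ t, (if pvPrevFlag (fun t => !(v k t) && v (k+1) t) (t+1) && !(!(v k (t+1)) && v (k+1) (t+1)) then (1:Int) else 0) = pvGN v (k+1) t := by
      intro t
      rw [pvPrevFlag_succ]
      simp only [pvGN, Nat.add_sub_cancel]
      cases v k t <;> cases v (k+1) t <;> cases v k (t+1) <;> cases v (k+1) (t+1) <;> rfl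
    rw [Finset.sum_congr rfl (fun t _ => hstep t)]
    exact pvSumExtend jnn _ (by simp [pvGN, hright]) (by omega)
  rw [Finset.sum_congr rfl (fun k _ => hinner k)]
  refine (pvSumShift inn (fun r => ∑ c ∈ Finset.range jnn, pvGN v r c) ?_ (by omega)).symm
  simp [pvGN, htop]

theorem pvFalls_sum_S (v : Nat → Nat → Bool) (inn jnn : Nat)
    (hin : 3 ≤ inn) (hjn : 3 ≤ jnn)
    (hbot : ∀ c, v (inn - 1) c = false)
    (hright : ∀ r, v r (jnn - 1) = false) :
    ∑ k ∈ Finset.range (inn - 1), ∑ t ∈ Finset.range jnn,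
        (if pvPrevFlag (fun t => v k t && !(v (k+1) t)) t && !(v k t && !(v (k+1) t)) then (1:Int) else 0)
    = ∑ r ∈ Finset.range inn, ∑ c ∈ Finset.range jnn, pvGS v r c := by
  have hinner : ∀ k, ∑ t ∈ Finset.range jnn,
      (if pvPrevFlag (fun t => v k t && !(v (k+1) t)) t && !(v k t && !(v (k+1) t)) then (1:Int) else 0)
      = ∑ c ∈ Finset.range jnn, pvGS v k c := by
    intro k
    rw [pvSumShift jnn _ (by simp [pvPrevFlag]) (by omega)]
    have hstep : ∀ t, (if pvPrevFlag (fun t => v k t && !(v (k+1) t)) (t+1) && !(v k (t+1) && !(v (k+1) (t+1))) then (1:Int) else 0) = pvGS v k t := by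
      intro t
      rw [pvPrevFlag_succ]
      simp only [pvGS]
      cases v k t <;> cases v (k+1) t <;> cases v k (t+1) <;> cases v (k+1) (t+1) <;> rfl
    rw [Finset.sum_congr rfl (fun t _ => hstep t)]
    exact pvSumExtend jnn _ (by simp [pvGS, hright]) (by omega)
  rw [Finset.sum_congr rfl (fun k _ => hinner k)]
  refine (pvSumExtend inn (fun r => ∑ c ∈ Finset.range jnn, pvGS v r c) ?_ (by omega))
  simp [pvGS, hbot]

theorem pvFalls_sum_W (v : Nat → Nat → Bool) (inn jnn : Nat)
    (hin : 3 ≤ inn) (hjn : 3 ≤ jnn)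
    (hbot : ∀ c, v (inn - 1) c = false)
    (hleft : ∀ r, v r 0 = false) :
    ∑ k ∈ Finset.range (jnn - 1), ∑ t ∈ Finset.range inn,
        (if pvPrevFlag (fun t => !(v t k) && v t (k+1)) t && !(!(v t k) && v t (k+1)) then (1:Int) else 0)
    = ∑ r ∈ Finset.range inn, ∑ c ∈ Finset.range jnn, pvGW v r c := by
  have hinner : ∀ k, ∑ t ∈ Finset.range inn,
      (if pvPrevFlag (fun t => !(v t k) && v t (k+1)) t && !(!(v t k) && v t (k+1)) then (1:Int) else 0)
      = ∑ r ∈ Finset.range inn, pvGW v r (k+1) := by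
    intro k
    rw [pvSumShift inn _ (by simp [pvPrevFlag]) (by omega)]
    have hstep : ∀ t, (if pvPrevFlag (fun t => !(v t k) && v t (k+1)) (t+1) && !(!(v (t+1) k) && v (t+1) (k+1)) then (1:Int) else 0) = pvGW v t (k+1) := by
      intro t
      rw [pvPrevFlag_succ]
      simp only [pvGW, Nat.add_sub_cancel]
      cases v t k <;> cases v t (k+1) <;> cases v (t+1) k <;> cases v (t+1) (k+1) <;> rfl
    rw [Finset.sum_congr rfl (fun t _ => hstep t)]
    exact pvSumExtend inn _ (by simp [pvGW, hbot]) (by omega)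
  rw [Finset.sum_congr rfl (fun k _ => hinner k)]
  rw [show (∑ r ∈ Finset.range inn, ∑ c ∈ Finset.range jnn, pvGW v r c)
      = ∑ c ∈ Finset.range jnn, ∑ r ∈ Finset.range inn, pvGW v r c from Finset.sum_comm]
  refine (pvSumShift jnn (fun c => ∑ r ∈ Finset.range inn, pvGW v r c) ?_ (by omega)).symm
  simp [pvGW, hleft]

theorem pvFalls_sum_E (v : Nat → Nat → Bool) (inn jnn : Nat)
    (hin : 3 ≤ inn) (hjn : 3 ≤ jnn)
    (hbot : ∀ c, v (inn - 1) c = false)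
    (hright : ∀ r, v r (jnn - 1) = false) :
    ∑ k ∈ Finset.range (jnn - 1), ∑ t ∈ Finset.range inn,
        (if pvPrevFlag (fun t => v t k && !(v t (k+1))) t && !(v t k && !(v t (k+1))) then (1:Int) else 0)
    = ∑ r ∈ Finset.range inn, ∑ c ∈ Finset.range jnn, pvGE v r c := by
  have hinner : ∀ k, ∑ t ∈ Finset.range inn,
      (if pvPrevFlag (fun t => v t k && !(v t (k+1))) t && !(v t k && !(v t (k+1))) then (1:Int) else 0)
      = ∑ r ∈ Finset.range inn, pvGE v r k := by
    intro k
    rw [pvSumShift inn _ (by simp [pvPrevFlag]) (by omega)]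
    have hstep : ∀ t, (if pvPrevFlag (fun t => v t k && !(v t (k+1))) (t+1) && !(v (t+1) k && !(v (t+1) (k+1))) then (1:Int) else 0) = pvGE v t k := by
      intro t
      rw [pvPrevFlag_succ]
      simp only [pvGE]
      cases v t k <;> cases v t (k+1) <;> cases v (t+1) k <;> cases v (t+1) (k+1) <;> rfl
    rw [Finset.sum_congr rfl (fun t _ => hstep t)]
    exact pvSumExtend inn _ (by simp [pvGE, hbot]) (by omega)
  rw [Finset.sum_congr rfl (fun k _ => hinner k)]
  rw [show (∑ r ∈ Finset.range inn, ∑ c ∈ Finset.range jnn, pvGE v r c)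
      = ∑ c ∈ Finset.range jnn, ∑ r ∈ Finset.range inn, pvGE v r c from Finset.sum_comm]
  refine (pvSumExtend jnn (fun c => ∑ r ∈ Finset.range inn, pvGE v r c) ?_ (by omega))
  simp [pvGE, hright]

theorem pvVal_bounds (S : List (Int × Int)) (mi mj Mi Mj : Int)
    (hb : ∀ x ∈ S, mi ≤ x.1 ∧ x.1 ≤ Mi ∧ mj ≤ x.2 ∧ x.2 ≤ Mj) (r c : Nat)
    (h : pvVal S mi mj r c = true) :
    1 ≤ r ∧ (r : Int) ≤ Mi - mi + 1 ∧ 1 ≤ c ∧ (c : Int) ≤ Mj - mj + 1 := by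
  have hm : (mi + (r : Int) - 1, mj + (c : Int) - 1) ∈ S := by simpa [pvVal] using h
  have h2 := hb _ hm
  simp only [] at h2
  omega

theorem pvVal_false (S : List (Int × Int)) (mi mj Mi Mj : Int)
    (hb : ∀ x ∈ S, mi ≤ x.1 ∧ x.1 ≤ Mi ∧ mj ≤ x.2 ∧ x.2 ≤ Mj) (r c : Nat)
    (h : ¬(1 ≤ r ∧ (r : Int) ≤ Mi - mi + 1 ∧ 1 ≤ c ∧ (c : Int) ≤ Mj - mj + 1)) :
    pvVal S mi mj r c = false := by
  cases hv : pvVal S mi mj r c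
  · rfl
  · exact absurd (pvVal_bounds S mi mj Mi Mj hb r c hv) h

theorem pvG_total (S : List (Int × Int)) (mi mj Mi Mj : Int)
    (hb : ∀ x ∈ S, mi ≤ x.1 ∧ x.1 ≤ Mi ∧ mj ≤ x.2 ∧ x.2 ≤ Mj) (r c : Nat) :
    pvGN (pvVal S mi mj) r c + pvGS (pvVal S mi mj) r c
      + pvGW (pvVal S mi mj) r c + pvGE (pvVal S mi mj) r c
    = (if pvVal S mi mj r c then pvF S (mi + (r : Int) - 1, mj + (c : Int) - 1) else 0) := by
  cases hv : pvVal S mi mj r c with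
  | false => simp [pvGN, pvGS, pvGW, pvGE, hv]
  | true =>
    obtain ⟨hr1, hr2, hc1, hc2⟩ := pvVal_bounds S mi mj Mi Mj hb r c hv
    rw [if_pos rfl]
    simp only [pvF]
    rw [show (mi + (r : Int) - 1 - 1 : Int) = mi + ((r - 1 : Nat) : Int) - 1 by omega,
        show (mj + (c : Int) - 1 - 1 : Int) = mj + ((c - 1 : Nat) : Int) - 1 by omega,
        show (mi + (r : Int) - 1 + 1 : Int) = mi + ((r + 1 : Nat) : Int) - 1 by push_cast; ring,
        show (mj + (c : Int) - 1 + 1 : Int) = mj + ((c + 1 : Nat) : Int) - 1 by push_cast; ring]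
    simp only [pvGN, pvGS, pvGW, pvGE, pvVal] at hv ⊢
    simp only [hv]
    generalize (decide ((mi + ((r - 1 : Nat) : Int) - 1, mj + (c : Int) - 1) ∈ S)) = bN
    generalize (decide ((mi + ((r + 1 : Nat) : Int) - 1, mj + (c : Int) - 1) ∈ S)) = bS
    generalize (decide ((mi + (r : Int) - 1, mj + ((c + 1 : Nat) : Int) - 1) ∈ S)) = bE
    generalize (decide ((mi + (r : Int) - 1, mj + ((c - 1 : Nat) : Int) - 1) ∈ S)) = bW
    generalize (decide ((mi + ((r - 1 : Nat) : Int) - 1, mj + ((c + 1 : Nat) : Int) - 1) ∈ S)) = bNE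
    generalize (decide ((mi + ((r + 1 : Nat) : Int) - 1, mj + ((c + 1 : Nat) : Int) - 1) ∈ S)) = bSE
    generalize (decide ((mi + ((r + 1 : Nat) : Int) - 1, mj + ((c - 1 : Nat) : Int) - 1) ∈ S)) = bSW
    cases bN <;> cases bS <;> cases bE <;> cases bW <;> cases bNE <;> cases bSE <;> cases bSW <;> rfl

theorem pvSum_cells (S : List (Int × Int)) (mi mj Mi Mj : Int)
    (hb : ∀ x ∈ S, mi ≤ x.1 ∧ x.1 ≤ Mi ∧ mj ≤ x.2 ∧ x.2 ≤ Mj) :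
    ∑ r ∈ Finset.range ((Mi - mi + 3).toNat), ∑ c ∈ Finset.range ((Mj - mj + 3).toNat),
      (if pvVal S mi mj r c then pvF S (mi + (r : Int) - 1, mj + (c : Int) - 1) else 0)
    = ((PySem.List.dedup S).map (pvF S)).sum := by
  refine Eq.trans (Finset.sum_product' (Finset.range ((Mi - mi + 3).toNat)) (Finset.range ((Mj - mj + 3).toNat))
      (fun r c => (if pvVal S mi mj r c then pvF S (mi + (r : Int) - 1, mj + (c : Int) - 1) else 0))).symm ?_
  refine Eq.trans (Finset.sum_filter (fun (p : Nat × Nat) => pvVal S mi mj p.1 p.2 = true)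
      (fun p => pvF S (mi + (p.1 : Int) - 1, mj + (p.2 : Int) - 1))).symm ?_
  refine Eq.trans ?_ (List.sum_toFinset _ (PySem.List.nodup_dedup S))
  refine Finset.sum_nbij' (fun p => ((mi + (p.1 : Int) - 1, mj + (p.2 : Int) - 1) : Int × Int))
    (fun x => (((x.1 - mi + 1).toNat, (x.2 - mj + 1).toNat) : Nat × Nat)) ?_ ?_ ?_ ?_ ?_
  · intro p hp
    simp only [Finset.mem_filter] at hp
    have hm : (mi + (p.1 : Int) - 1, mj + (p.2 : Int) - 1) ∈ S := by
      have := hp.2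
      simpa [pvVal] using this
    simp [List.mem_toFinset, PySem.List.dedup_eq_ofList, PySem.Set.mem_ofList, hm]
  · intro x hx
    have hm : x ∈ S := by
      simpa [PySem.List.dedup_eq_ofList, PySem.Set.mem_ofList] using List.mem_toFinset.mp hx
    obtain ⟨h1, h2, h3, h4⟩ := hb x hm
    simp only [Finset.mem_filter, Finset.mem_product, Finset.mem_range]
    refine ⟨⟨by omega, by omega⟩, ?_⟩
    have e1 : (mi + (((x.1 - mi + 1).toNat : Nat) : Int) - 1, mj + (((x.2 - mj + 1).toNat : Nat) : Int) - 1) = x := by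
      rw [Prod.ext_iff]
      constructor <;> simp only [] <;> omega
    simp only [pvVal]
    rw [e1]
    exact decide_eq_true hm
  · intro p hp
    simp only [Finset.mem_filter, Finset.mem_product, Finset.mem_range] at hp
    obtain ⟨⟨hp1, hp2⟩, hpv⟩ := hp
    obtain ⟨h1, h2, h3, h4⟩ := pvVal_bounds S mi mj Mi Mj hb p.1 p.2 hpv
    rw [Prod.ext_iff]
    constructor <;> simp only [] <;> omega
  · intro x hx
    have hm : x ∈ S := by
      simpa [PySem.List.dedup_eq_ofList, PySem.Set.mem_ofList] using List.mem_toFinset.mp hx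
    obtain ⟨h1, h2, h3, h4⟩ := hb x hm
    rw [Prod.ext_iff]
    constructor <;> simp only [] <;> omega
  · intro p hp
    rfl

theorem pv_getD_map_range {β : Type} (n : Nat) (f : Nat → β) (d : β) (r : Nat) :
    ((List.range n).map f).getD r d = if r < n then f r else d := by
  by_cases h : r < n
  · simp [List.getD_eq_getElem?_getD, List.getElem?_eq_getElem, h]
  · have h2 : n ≤ r := by omega
    simp [List.getD_eq_getElem?_getD, List.getElem?_eq_none, h2, h]

theorem pv_getD_map {α β : Type} (l : List α) (f : α → β) (d : β) (dd : α) (c : Nat) :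
    (l.map f).getD c d = if c < l.length then f (l.getD c dd) else d := by
  by_cases h : c < l.length
  · simp [List.getD_eq_getElem?_getD, List.getElem?_eq_getElem, h]
  · have h2 : l.length ≤ c := by omega
    simp [List.getD_eq_getElem?_getD, List.getElem?_eq_none, h2, h]

-- entries of the transposed grid
theorem pvTransE (fl : List (List Bool)) (v : Nat → Nat → Bool) (inn jnn : Nat)
    (hlen : fl.length = inn)
    (hval : ∀ r c, pvE fl r c = v r c)
    (hvout : ∀ r c, (inn ≤ c ∨ jnn ≤ r) → v c r = false) :
    ∀ r c, pvE ((List.range jnn).map (fun (k : Nat) => fl.map (fun row => PySem.List.pyGetD row (0 + (k : Int)) false))) r c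
      = v c r := by
  intro r c
  simp only [pvE]
  rw [pv_getD_map_range]
  by_cases hr : r < jnn
  · rw [if_pos hr, pv_getD_map _ _ _ [] c]
    by_cases hc : c < fl.length
    · rw [if_pos hc, zero_add, PySem.List.pyGetD_natCast]
      exact hval c r
    · rw [if_neg hc]
      exact (hvout r c (Or.inl (by omega))).symm
  · rw [if_neg hr]
    simp only [List.getD_nil]
    exact (hvout r c (Or.inr (by omega))).symm

-- B's loop sums the per-cell corner counts over the distinct cells
theorem pvAlt_eq (region : String × (List (Int × Int))) :
    price_for_region_2_alt region
      = (region.2.length : Int) * ((PySem.List.dedup region.2).map (pvF region.2)).sum := by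
  obtain ⟨nm, S⟩ := region
  simp only [price_for_region_2_alt]
  have hcont : ∀ y : Int × Int, PySem.Set.contains (PySem.Set.ofList S) y = decide (y ∈ S) := by
    intro y
    by_cases h : y ∈ S
    · rw [decide_eq_true h]
      exact (PySem.Set.contains_iff _ _).mpr ((PySem.Set.mem_ofList _ _).mpr h)
    · rw [decide_eq_false h]
      cases hc : PySem.Set.contains (PySem.Set.ofList S) y
      · rfl
      · exact absurd ((PySem.Set.mem_ofList _ _).mp ((PySem.Set.contains_iff _ _).mp hc)) h
  have hbody : ∀ (sides : Int), ∀ cell ∈ (PySem.Set.ofList S : List (Int × Int)),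
      (let i := cell.1
       let j := cell.2
       let n := PySem.Set.contains (PySem.Set.ofList S) (i - 1, j)
       let s := PySem.Set.contains (PySem.Set.ofList S) (i + 1, j)
       let e := PySem.Set.contains (PySem.Set.ofList S) (i, j + 1)
       let w := PySem.Set.contains (PySem.Set.ofList S) (i, j - 1)
       let ne := PySem.Set.contains (PySem.Set.ofList S) (i - 1, j + 1)
       let se := PySem.Set.contains (PySem.Set.ofList S) (i + 1, j + 1)
       let sw := PySem.Set.contains (PySem.Set.ofList S) (i + 1, j - 1)
       let sides := if !n && (!e || ne) then sides + 1 else sides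
       let sides := if !s && (!e || se) then sides + 1 else sides
       let sides := if !w && (!s || sw) then sides + 1 else sides
       let sides := if !e && (!s || se) then sides + 1 else sides
       sides) = sides + pvF S cell := by
    intro sides cell _
    simp only [hcont, pvF]
    split_ifs <;> omega
  rw [PySem.List.foldl_congr_mem _ _ (fun sides cell => sides + pvF S cell) 0 hbody,
    PySem.List.foldl_add, PySem.List.dedup_eq_ofList, zero_add, PySem.List.len_eq]

-- ===== VERDICT (by name: the statement is the Claim_ definition above) =====
theorem price_for_region_2_spec : Claim_equal_price_for_region_2 := by
  unfold Claim_equal_price_for_region_2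
  intro region _ hpre
  unfold Spec_price_for_region_2
  obtain ⟨nm, S⟩ := region
  have hS : S ≠ [] := hpre
  rcases hmin1 : PySem.List.min? S (fun x => x.1) with _ | a
  · exact absurd ((PySem.List.min?_eq_none_iff _ _).mp hmin1) hS
  rcases hmax1 : PySem.List.max? S (fun x => x.1) with _ | b
  · exact absurd ((PySem.List.max?_eq_none_iff _ _).mp hmax1) hS
  rcases hmin2 : PySem.List.min? S (fun x => x.2) with _ | c
  · exact absurd ((PySem.List.min?_eq_none_iff _ _).mp hmin2) hS
  rcases hmax2 : PySem.List.max? S (fun x => x.2) with _ | d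
  · exact absurd ((PySem.List.max?_eq_none_iff _ _).mp hmax2) hS
  have hbounds : ∀ x ∈ S, a.1 ≤ x.1 ∧ x.1 ≤ b.1 ∧ c.2 ≤ x.2 ∧ x.2 ≤ d.2 := by
    intro x hx
    exact ⟨PySem.List.min?_isMin hmin1 x hx, PySem.List.max?_isMax hmax1 x hx,
           PySem.List.min?_isMin hmin2 x hx, PySem.List.max?_isMax hmax2 x hx⟩
  have hamem : a ∈ S := PySem.List.min?_mem hmin1
  have hab : a.1 ≤ b.1 := (hbounds a hamem).2.1
  have hcd : c.2 ≤ d.2 := le_trans (hbounds a hamem).2.2.1 (hbounds a hamem).2.2.2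
  -- reduce A's match
  simp only [price_for_region_2, hmin1, hmax1, hmin2, hmax2]
  -- grid facts
  have h0i : (0 : Int) ≤ b.1 - a.1 + 3 := by omega
  have h0j : (0 : Int) ≤ d.2 - c.2 + 3 := by omega
  obtain ⟨hg0len, hg0row, hg0E⟩ := pvGrid0_shape (b.1 - a.1 + 3) (d.2 - c.2 + 3) h0i h0j
  obtain ⟨hflen, hfrow, hfE⟩ := pvFill_spec a.1 c.2 b.1 d.2 S
    (pvGrid0 (b.1 - a.1 + 3) (d.2 - c.2 + 3)) ⟨hab, hcd⟩ hbounds hg0len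
    (fun r hr => hg0row r (by rw [hg0len] at hr; exact hr))
  set fl := pvFill a.1 c.2 (pvGrid0 (b.1 - a.1 + 3) (d.2 - c.2 + 3)) S with hfldef
  set inn := (b.1 - a.1 + 3).toNat with hinndef
  set jnn := (d.2 - c.2 + 3).toNat with hjnndef
  set v := pvVal S a.1 c.2 with hvdef
  have hval : ∀ r c', pvE fl r c' = v r c' := by
    intro r c'
    rw [hfE r c', hg0E r c']
    simp [hvdef, pvVal]
  have hinn3 : 3 ≤ inn := by omega
  have hjnn3 : 3 ≤ jnn := by omega
  have hinnI : (inn : Int) = b.1 - a.1 + 3 := by omega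
  have hjnnI : (jnn : Int) = d.2 - c.2 + 3 := by omega
  have hrowl : ∀ k, k < inn → (fl.getD k []).length = jnn := by
    intro k hk
    exact hfrow k (by rw [hg0len]; exact hk)
  have htop : ∀ c', v 0 c' = false :=
    fun c' => pvVal_false S a.1 c.2 b.1 d.2 hbounds 0 c' (by omega)
  have hbot : ∀ c', v (inn - 1) c' = false :=
    fun c' => pvVal_false S a.1 c.2 b.1 d.2 hbounds (inn - 1) c' (by omega)
  have hleft : ∀ r, v r 0 = false :=
    fun r => pvVal_false S a.1 c.2 b.1 d.2 hbounds r 0 (by omega)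
  have hright : ∀ r, v r (jnn - 1) = false :=
    fun r => pvVal_false S a.1 c.2 b.1 d.2 hbounds r (jnn - 1) (by omega)
  have hout : ∀ r c', (inn ≤ c' ∨ jnn ≤ r) → v c' r = false :=
    fun r c' h => pvVal_false S a.1 c.2 b.1 d.2 hbounds c' r (by omega)
  -- horizontal sweep
  have hH : pvGetSides fl
      = ∑ r ∈ Finset.range inn, ∑ cc ∈ Finset.range jnn, (pvGN v r cc + pvGS v r cc) := by
    rw [pvGetSides_eq_sum fl, hflen]
    have hterm : ∀ k ∈ Finset.range (inn - 1),
        (pvFalls (fun t => !(pvE fl k t) && pvE fl (k+1) t) ((fl.getD k []).length)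
         + pvFalls (fun t => pvE fl k t && !(pvE fl (k+1) t)) ((fl.getD k []).length))
        = (∑ t ∈ Finset.range jnn,
            (if pvPrevFlag (fun t => !(v k t) && v (k+1) t) t && !(!(v k t) && v (k+1) t) then (1:Int) else 0))
          + (∑ t ∈ Finset.range jnn,
            (if pvPrevFlag (fun t => v k t && !(v (k+1) t)) t && !(v k t && !(v (k+1) t)) then (1:Int) else 0)) := by
      intro k hk
      rw [Finset.mem_range] at hk
      rw [hrowl k (by omega),
        show (fun t => !(pvE fl k t) && pvE fl (k+1) t) = (fun t => !(v k t) && v (k+1) t) from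
          funext fun t => by rw [hval, hval],
        show (fun t => pvE fl k t && !(pvE fl (k+1) t)) = (fun t => v k t && !(v (k+1) t)) from
          funext fun t => by rw [hval, hval],
        pvFalls_eq_sum, pvFalls_eq_sum]
    rw [Finset.sum_congr rfl hterm, Finset.sum_add_distrib,
      pvFalls_sum_N v inn jnn hinn3 hjnn3 htop hright,
      pvFalls_sum_S v inn jnn hinn3 hjnn3 hbot hright, ← Finset.sum_add_distrib]
    exact Finset.sum_congr rfl fun r _ => by rw [← Finset.sum_add_distrib]
  -- the transposed grid
  have htrans : (PySem.List.pyRange 0 (PySem.List.len (PySem.List.pyGetD fl 0 [])) 1).map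
        (fun i => fl.map (fun row => PySem.List.pyGetD row i false))
      = (List.range jnn).map
        (fun (k : Nat) => fl.map (fun row => PySem.List.pyGetD row (0 + (k : Int)) false)) := by
    rw [PySem.List.pyGetD_zero]
    have h1 : PySem.List.len (fl.getD 0 []) = (jnn : Int) := by
      rw [PySem.List.len_eq, hrowl 0 (by omega)]
    rw [h1, PySem.List.pyRange_one, show (((jnn : Int)) - 0).toNat = jnn by omega, List.map_map]
    rfl
  set tr := (List.range jnn).map
    (fun (k : Nat) => fl.map (fun row => PySem.List.pyGetD row (0 + (k : Int)) false)) with htrdef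
  have htrlen : tr.length = jnn := by simp [htrdef]
  have htrrow : ∀ k, k < jnn → (tr.getD k []).length = inn := by
    intro k hk
    rw [htrdef, pv_getD_map_range, if_pos hk, List.length_map, hflen]
  have hvalT : ∀ r c', pvE tr r c' = v c' r := pvTransE fl v inn jnn hflen hval hout
  -- vertical sweep
  have hV : pvGetSides tr
      = ∑ r ∈ Finset.range inn, ∑ cc ∈ Finset.range jnn, (pvGW v r cc + pvGE v r cc) := by
    rw [pvGetSides_eq_sum tr, htrlen]
    have hterm : ∀ k ∈ Finset.range (jnn - 1),
        (pvFalls (fun t => !(pvE tr k t) && pvE tr (k+1) t) ((tr.getD k []).length)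
         + pvFalls (fun t => pvE tr k t && !(pvE tr (k+1) t)) ((tr.getD k []).length))
        = (∑ t ∈ Finset.range inn,
            (if pvPrevFlag (fun t => !(v t k) && v t (k+1)) t && !(!(v t k) && v t (k+1)) then (1:Int) else 0))
          + (∑ t ∈ Finset.range inn,
            (if pvPrevFlag (fun t => v t k && !(v t (k+1))) t && !(v t k && !(v t (k+1))) then (1:Int) else 0)) := by
      intro k hk
      rw [Finset.mem_range] at hk
      rw [htrrow k (by omega),
        show (fun t => !(pvE tr k t) && pvE tr (k+1) t) = (fun t => !(v t k) && v t (k+1)) from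
          funext fun t => by rw [hvalT, hvalT],
        show (fun t => pvE tr k t && !(pvE tr (k+1) t)) = (fun t => v t k && !(v t (k+1))) from
          funext fun t => by rw [hvalT, hvalT],
        pvFalls_eq_sum, pvFalls_eq_sum]
    rw [Finset.sum_congr rfl hterm, Finset.sum_add_distrib,
      pvFalls_sum_W v inn jnn hinn3 hjnn3 hbot hleft,
      pvFalls_sum_E v inn jnn hinn3 hjnn3 hbot hright, ← Finset.sum_add_distrib]
    exact Finset.sum_congr rfl fun r _ => by rw [← Finset.sum_add_distrib]
  -- put everything together
  rw [pvAlt_eq, PySem.List.len_eq, htrans, hH, hV, ← Finset.sum_add_distrib]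
  congr 1
  rw [show (∑ r ∈ Finset.range inn,
        ((∑ cc ∈ Finset.range jnn, (pvGN v r cc + pvGS v r cc))
          + ∑ cc ∈ Finset.range jnn, (pvGW v r cc + pvGE v r cc)))
      = ∑ r ∈ Finset.range inn, ∑ cc ∈ Finset.range jnn,
          (pvGN v r cc + pvGS v r cc + pvGW v r cc + pvGE v r cc) from
    Finset.sum_congr rfl fun r _ => by rw [← Finset.sum_add_distrib]; exact Finset.sum_congr rfl fun cc _ => by ring]
  rw [show (∑ r ∈ Finset.range inn, ∑ cc ∈ Finset.range jnn,
        (pvGN v r cc + pvGS v r cc + pvGW v r cc + pvGE v r cc))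
      = ∑ r ∈ Finset.range inn, ∑ cc ∈ Finset.range jnn,
          (if v r cc then pvF S (a.1 + (r : Int) - 1, c.2 + (cc : Int) - 1) else 0) from
    Finset.sum_congr rfl fun r _ => Finset.sum_congr rfl fun cc _ =>
      pvG_total S a.1 c.2 b.1 d.2 hbounds r cc]
  exact pvSum_cells S a.1 c.2 b.1 d.2 hbounds
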